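-- pv_equiv track=rewrite | github.com/samoKrajci/L-Graphs | bruteforce-smarter.py | get_min_height
-- ===== SOURCE A (Python) =====
-- def get_min_height(v, v_index, vert_order, lengths, g):
--     '''
--     pre dany vrchol zisti najmensiu potrebnu vysku
--     (tak aby sa pretol s potrebnymi vrcholmi)
--     '''
--     min_height = 0
--     cant_be_longer = False
--     for i, other in enumerate(vert_order):
--         if other in g[v]:
--             if cant_be_longer:
--                 return -1
--             min_height = i+1
--         elif lengths[other] >= v_index:
--             cant_be_longer = True
--     return min_height
-- ===== SOURCE B (Python) =====
-- def get_min_height(v, v_index, vert_order, lengths, g):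
--     L = -1
--     for i, u in reversed(list(enumerate(vert_order))):
--         if u in g[v]:
--             L = i
--             break
--     if L == -1:
--         return 0
--     for u in vert_order[:L]:
--         if u not in g[v] and lengths[u] >= v_index:
--             return -1
--     return L + 1
-- ===== Notes on version B (the rewrite author's own statement) =====
-- stated objective: alternative
-- what changed: Replaces A's single forward pass carrying a min_height accumulator and a cant_be_longer flag by two independent steps: a reverse scan that finds the index L of the last neighbor, then a scan of vert_order[:L] that returns -1 at the first blocker (non-neighbor with lengths[u] >= v_index).
import Mathlib
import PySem

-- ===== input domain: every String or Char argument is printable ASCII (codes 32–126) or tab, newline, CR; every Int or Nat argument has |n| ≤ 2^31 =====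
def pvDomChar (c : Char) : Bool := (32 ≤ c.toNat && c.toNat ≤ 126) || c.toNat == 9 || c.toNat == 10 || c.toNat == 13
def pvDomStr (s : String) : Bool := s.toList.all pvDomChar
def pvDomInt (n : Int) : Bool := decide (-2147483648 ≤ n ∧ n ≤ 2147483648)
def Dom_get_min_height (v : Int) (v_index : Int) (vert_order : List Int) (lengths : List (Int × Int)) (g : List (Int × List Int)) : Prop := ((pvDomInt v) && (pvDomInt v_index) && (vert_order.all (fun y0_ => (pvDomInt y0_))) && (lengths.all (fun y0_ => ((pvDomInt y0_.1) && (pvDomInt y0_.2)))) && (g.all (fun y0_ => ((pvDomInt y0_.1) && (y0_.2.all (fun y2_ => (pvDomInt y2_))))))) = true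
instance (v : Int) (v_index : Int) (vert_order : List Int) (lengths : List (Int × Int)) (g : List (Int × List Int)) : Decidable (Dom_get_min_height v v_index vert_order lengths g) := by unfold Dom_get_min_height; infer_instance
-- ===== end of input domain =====

-- B replaces A's one forward pass with a flag by a reverse scan for the last neighbor plus a
-- prefix scan for the first blocker (objective: alternative decomposition, same cost).

-- ===== PORT A =====
-- g[v] and lengths[other] are dict lookups (KeyError on a missing key); Pre_get_min_height
-- guarantees every key the Python actually looks up exists, so getD's default never matters there.
def gmhA_loop (nbrs : List Int) (v_index : Int) (lengths : List (Int × Int)) :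
    List (Int × Int) → Int → Bool → Int
  | [], min_height, _ => min_height
  | (i, other) :: rest, min_height, cant_be_longer =>
    if nbrs.contains other then
      if cant_be_longer then -1
      else gmhA_loop nbrs v_index lengths rest (i + 1) cant_be_longer
    else if v_index ≤ (PySem.Dict.mk lengths).getD other 0 then
      gmhA_loop nbrs v_index lengths rest min_height true
    else
      gmhA_loop nbrs v_index lengths rest min_height cant_be_longer

def get_min_height (v : Int) (v_index : Int) (vert_order : List Int) (lengths : List (Int × Int)) (g : List (Int × List Int)) : Int :=
  gmhA_loop ((PySem.Dict.mk g).getD v []) v_index lengths (PySem.List.enumerate vert_order) 0 false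

-- ===== PORT B =====
-- for i, u in reversed(list(enumerate(vert_order))): if u in g[v]: L = i; break
def gmhB_last (nbrs : List Int) : List (Int × Int) → Int
  | [] => -1
  | (i, u) :: rest => if nbrs.contains u then i else gmhB_last nbrs rest

-- for u in vert_order[:L]: if u not in g[v] and lengths[u] >= v_index: return -1
def gmhB_scan (nbrs : List Int) (v_index : Int) (lengths : List (Int × Int)) : List Int → Bool
  | [] => false
  | u :: rest =>
    if !nbrs.contains u && decide (v_index ≤ (PySem.Dict.mk lengths).getD u 0) then true
    else gmhB_scan nbrs v_index lengths rest

def get_min_height_alt (v : Int) (v_index : Int) (vert_order : List Int) (lengths : List (Int × Int)) (g : List (Int × List Int)) : Int :=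
  let L := gmhB_last ((PySem.Dict.mk g).getD v []) (PySem.List.enumerate vert_order).reverse
  if L == -1 then 0
  else if gmhB_scan ((PySem.Dict.mk g).getD v []) v_index lengths
      (PySem.List.slice vert_order none (some L)) then -1
  else L + 1

-- ===== PRECONDITION & SPEC =====
-- Pre_ excludes exactly the inputs on which the Python A raises KeyError: v must be a key of g
-- whenever the loop body runs (vert_order nonempty), and any listed vertex that is neither a
-- neighbor of v nor a key of lengths must lie strictly after a blocker-then-neighbor pattern,
-- i.e. after the point where A has already returned -1.
def Pre_get_min_height (v : Int) (v_index : Int) (vert_order : List Int) (lengths : List (Int × Int)) (g : List (Int × List Int)) : Prop :=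
  (vert_order = [] ∨ (PySem.Dict.mk g).contains v = true) ∧
  ∀ i ∈ List.range vert_order.length,
    (((PySem.Dict.mk g).getD v []).contains (vert_order.getD i 0) = false ∧
      (PySem.Dict.mk lengths).contains (vert_order.getD i 0) = false) →
    ∃ j' ∈ List.range i,
      ((PySem.Dict.mk g).getD v []).contains (vert_order.getD j' 0) = true ∧
      ∃ j ∈ List.range j',
        ((PySem.Dict.mk g).getD v []).contains (vert_order.getD j 0) = false ∧
        (PySem.Dict.mk lengths).contains (vert_order.getD j 0) = true ∧
        v_index ≤ (PySem.Dict.mk lengths).getD (vert_order.getD j 0) 0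
instance (v : Int) (v_index : Int) (vert_order : List Int) (lengths : List (Int × Int)) (g : List (Int × List Int)) : Decidable (Pre_get_min_height v v_index vert_order lengths g) := by unfold Pre_get_min_height; infer_instance

def pvWitness_get_min_height : Int × Int × List Int × (List (Int × Int)) × (List (Int × List Int)) :=
  (0, 1, [1, 2], [(1, 0), (2, 3)], [(0, [2])])

def Spec_get_min_height (v : Int) (v_index : Int) (vert_order : List Int) (lengths : List (Int × Int)) (g : List (Int × List Int)) (out : Int) : Prop := out = get_min_height_alt v v_index vert_order lengths g
instance (v : Int) (v_index : Int) (vert_order : List Int) (lengths : List (Int × Int)) (g : List (Int × List Int)) (out : Int) : Decidable (Spec_get_min_height v v_index vert_order lengths g out) := by unfold Spec_get_min_height; infer_instance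

-- ===== CLAIM (what is proved, stated in full; the proofs are below) =====
def Claim_equal_get_min_height : Prop := ∀ (v : Int) (v_index : Int) (vert_order : List Int) (lengths : List (Int × Int)) (g : List (Int × List Int)), Dom_get_min_height v v_index vert_order lengths g → Pre_get_min_height v v_index vert_order lengths g → Spec_get_min_height v v_index vert_order lengths g (get_min_height v v_index vert_order lengths g)

-- ===== LEMMAS AND PROOFS =====

-- position of the last neighbor in a list (proof-side characterisation shared by both ports)
def pvLastN (nbrs : List Int) : List Int → Option Nat
  | [] => none
  | x :: xs =>
    match pvLastN nbrs xs with
    | some k => some (k + 1)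
    | none => if nbrs.contains x then some 0 else none

theorem pvLastN_none_iff (nbrs : List Int) (l : List Int) :
    pvLastN nbrs l = none ↔ l.any (fun u => nbrs.contains u) = false := by
  induction l with
  | nil => simp [pvLastN]
  | cons x xs ih =>
    cases h : pvLastN nbrs xs with
    | some k =>
      have hany : xs.any (fun u => nbrs.contains u) = true := by
        by_contra hf
        simp only [Bool.not_eq_true] at hf
        rw [← ih] at hf
        rw [hf] at h
        cases h
      simp only [pvLastN, h, List.any_cons, hany, Bool.or_true]
      constructor
      · intro hc; cases hc
      · intro hc; cases hc
    | none =>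
      have hxs := ih.mp h
      by_cases hx : nbrs.contains x = true <;>
        simp only [pvLastN, h, hx, List.any_cons, hxs, Bool.or_false, if_true, if_false,
          Bool.false_eq_true, Bool.true_eq_false, reduceCtorEq]

theorem gmhA_char (nbrs : List Int) (v_index : Int) (lengths : List (Int × Int))
    (l : List Int) (s mh : Int) (cbl : Bool) :
    gmhA_loop nbrs v_index lengths (PySem.List.enumerate l s) mh cbl =
      match pvLastN nbrs l with
      | none => mh
      | some k =>
        if cbl || (l.take k).any
            (fun u => !nbrs.contains u && decide (v_index ≤ (PySem.Dict.mk lengths).getD u 0))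
          then -1 else s + k + 1 := by
  induction l generalizing s mh cbl with
  | nil => simp [PySem.List.enumerate, gmhA_loop, pvLastN]
  | cons x xs ih =>
    rw [PySem.List.enumerate_cons]
    by_cases hx : nbrs.contains x = true
    · cases cbl with
      | true =>
        simp only [gmhA_loop, hx, if_true, pvLastN]
        cases h : pvLastN nbrs xs <;> simp
      | false =>
        simp only [gmhA_loop, hx, if_true, if_false, Bool.false_eq_true, ih, pvLastN]
        cases h : pvLastN nbrs xs with
        | none => simp
        | some k =>
          simp only [List.take_succ_cons, List.any_cons, hx, Bool.not_true, Bool.false_and,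
            Bool.false_or]
          split <;> [rfl; (push_cast; ring)]
    · have hx' : nbrs.contains x = false := by simpa using hx
      by_cases hb : v_index ≤ (PySem.Dict.mk lengths).getD x 0
      · simp only [gmhA_loop, hx', Bool.false_eq_true, if_false, hb, if_true, ih, pvLastN]
        cases h : pvLastN nbrs xs with
        | none => simp
        | some k =>
          simp only [List.take_succ_cons, List.any_cons, hx', Bool.not_false, Bool.true_and,
            hb, decide_true, Bool.true_or, Bool.or_true, if_true]
      · simp only [gmhA_loop, hx', Bool.false_eq_true, if_false, hb, ih, pvLastN]
        cases h : pvLastN nbrs xs with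
        | none => simp
        | some k =>
          simp only [List.take_succ_cons, List.any_cons, hx', Bool.not_false, Bool.true_and,
            hb, decide_false, Bool.false_or]
          split <;> [rfl; (push_cast; ring)]

theorem gmhB_last_append (nbrs : List Int) (ys zs : List (Int × Int)) :
    gmhB_last nbrs (ys ++ zs) =
      if ys.any (fun p => nbrs.contains p.2) then gmhB_last nbrs ys else gmhB_last nbrs zs := by
  induction ys with
  | nil => simp
  | cons p ys ih =>
    obtain ⟨i, u⟩ := p
    by_cases h : nbrs.contains u = true
    · have hm : u ∈ nbrs := by simpa using h
      simp [gmhB_last, hm]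
    · have hf : nbrs.contains u = false := by simpa using h
      simp only [gmhB_last, List.cons_append, hf, Bool.false_eq_true, if_false, List.any_cons,
        Bool.false_or, ih]

theorem gmhB_char (nbrs : List Int) (l : List Int) (s : Int) :
    gmhB_last nbrs (PySem.List.enumerate l s).reverse =
      match pvLastN nbrs l with
      | none => -1
      | some k => s + k := by
  induction l generalizing s with
  | nil => simp [PySem.List.enumerate, gmhB_last, pvLastN]
  | cons x xs ih =>
    rw [PySem.List.enumerate_cons, List.reverse_cons, gmhB_last_append]
    have hany : ((PySem.List.enumerate xs (s + 1)).reverse.any (fun p => nbrs.contains p.2))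
        = xs.any (fun u => nbrs.contains u) := by
      rw [List.any_reverse]
      have := PySem.List.map_snd_enumerate xs (s + 1)
      calc (PySem.List.enumerate xs (s + 1)).any (fun p => nbrs.contains p.2)
          = ((PySem.List.enumerate xs (s + 1)).map (·.2)).any (fun u => nbrs.contains u) := by
            rw [List.any_map]; rfl
        _ = xs.any (fun u => nbrs.contains u) := by rw [this]
    rw [hany]
    by_cases h : xs.any (fun u => nbrs.contains u) = true
    · have hne : pvLastN nbrs xs ≠ none := by
        rw [Ne, pvLastN_none_iff, h]; simp
      cases hk : pvLastN nbrs xs with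
      | none => exact absurd hk hne
      | some k =>
        simp only [h, if_true, ih, hk, pvLastN]
        push_cast; ring
    · have hf : (xs.any fun u => nbrs.contains u) = false := by simpa using h
      have hnone : pvLastN nbrs xs = none := by
        rw [pvLastN_none_iff]; exact hf
      simp only [hf, Bool.false_eq_true, if_false, pvLastN, hnone, gmhB_last]
      by_cases hx : nbrs.contains x = true
      · have hm : x ∈ nbrs := by simpa using hx
        simp [hm]
      · have hm : x ∉ nbrs := by simpa using hx
        simp [hm]

theorem gmhB_scan_eq_any (nbrs : List Int) (v_index : Int) (lengths : List (Int × Int))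
    (l : List Int) :
    gmhB_scan nbrs v_index lengths l =
      l.any (fun u => !nbrs.contains u && decide (v_index ≤ (PySem.Dict.mk lengths).getD u 0)) := by
  induction l with
  | nil => rfl
  | cons x xs ih =>
    simp only [gmhB_scan, List.any_cons, ih]
    split <;> simp_all

-- ===== VERDICT (by name: the statement is the Claim_ definition above) =====
theorem get_min_height_spec : Claim_equal_get_min_height := by
  intro v v_index vert_order lengths g _ _
  show get_min_height v v_index vert_order lengths g
      = get_min_height_alt v v_index vert_order lengths g
  simp only [get_min_height, get_min_height_alt]
  rw [gmhA_char, gmhB_char]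
  cases hk : pvLastN ((PySem.Dict.mk g).getD v []) vert_order with
  | none => simp
  | some k =>
    simp only
    have hL : ((0 + (k : Int)) == -1) = false := by
      simp only [beq_eq_false_iff_ne, ne_eq]; omega
    rw [hL]
    have h0 : (0 : Int) + (k : Int) = ((k : Nat) : Int) := by ring
    simp only [Bool.false_eq_true, if_false, h0, PySem.List.slice_to_natCast,
      gmhB_scan_eq_any]
    cases hA : (vert_order.take k).any
        (fun u => !((PySem.Dict.mk g).getD v []).contains u &&
          decide (v_index ≤ (PySem.Dict.mk lengths).getD u 0)) <;> simp
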